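-- pv_equiv track=rewrite | github.com/memo-ozdincer/cb-for-agents | scripts/cb_data_generation/ingest_agentdojo_splits.py | convert_messages_to_standard_format
-- ===== SOURCE A (Python) =====
-- from typing import Any, Dict, List, Optional, Tuple
--
-- def convert_messages_to_standard_format(
--     messages: List[Dict[str, Any]]
-- ) -> List[Dict[str, str]]:
--     """
--     Convert AgentDojo messages to standard format (system, user, assistant).
--
--     AgentDojo has:
--     - system: System prompt
--     - user: User messages
--     - assistant: Assistant responses with optional tool_calls
--     - tool: Tool results
--
--     We extract the pre-assistant context (all messages before last assistant turn).
--     """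
--     # Find the index of the last assistant message
--     last_assistant_idx = -1
--     for i, msg in enumerate(messages):
--         if msg.get("role") == "assistant":
--             last_assistant_idx = i
--
--     if last_assistant_idx < 0:
--         # No assistant message, return all as context
--         result = []
--         for msg in messages:
--             role = msg.get("role", "user")
--             content = msg.get("content", "")
--             if role in ("system", "user") and content:
--                 result.append({"role": role, "content": content})
--         return result
--
--     # Return messages up to (but not including) last assistant
--     result = []
--     for msg in messages[:last_assistant_idx]:
--         role = msg.get("role", "user")
--         content = msg.get("content", "")
--
--         # Skip tool results for input context
--         if role == "tool":
--             continue
--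
--         if role in ("system", "user", "assistant") and content:
--             result.append({"role": role, "content": content})
--
--     return result
-- ===== SOURCE B (Python) =====
-- def convert_messages_to_standard_format(messages):
--     """Single pass: keep a filtered accumulator; snapshot it (before appending)
--     each time an assistant message is seen; return the last snapshot, or the
--     whole accumulator if no assistant message occurred."""
--     acc = []
--     result = None
--     for msg in messages:
--         if msg.get("role") == "assistant":
--             result = list(acc)
--         role = msg.get("role", "user")
--         content = msg.get("content", "")
--         if role in ("system", "user", "assistant") and content:
--             acc.append({"role": role, "content": content})
--     return acc if result is None else result
-- ===== Notes on version B (the rewrite author's own statement) =====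
-- stated objective: alternative
-- what changed: Replaced A's two-phase scheme (one pass to find the last assistant index, then a second filtering pass over a slice or over the whole list) by a single traversal that maintains a filtered accumulator and snapshots it whenever an assistant message is encountered, returning the last snapshot (or the accumulator if none).
import Mathlib
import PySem

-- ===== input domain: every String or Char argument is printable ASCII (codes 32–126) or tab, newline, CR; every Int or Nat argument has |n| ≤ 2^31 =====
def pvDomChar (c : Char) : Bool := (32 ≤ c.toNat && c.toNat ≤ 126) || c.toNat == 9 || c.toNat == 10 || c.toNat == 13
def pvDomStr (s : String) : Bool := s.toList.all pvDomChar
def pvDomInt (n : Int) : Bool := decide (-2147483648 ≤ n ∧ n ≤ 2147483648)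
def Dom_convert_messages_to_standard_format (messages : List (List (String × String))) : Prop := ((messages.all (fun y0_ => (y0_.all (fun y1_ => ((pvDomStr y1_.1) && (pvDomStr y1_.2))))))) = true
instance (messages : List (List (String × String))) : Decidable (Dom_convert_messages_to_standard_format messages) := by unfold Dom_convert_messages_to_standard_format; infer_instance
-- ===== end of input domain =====

-- B replaces A's find-last-assistant-index-then-slice-and-filter scheme by one
-- filtering pass that snapshots the accumulator at each assistant message (objective: alternative).

-- msg.get(k) on a dict rendered as an association list (first-match lookup)
def pvGetMsg (m : List (String × String)) (k : String) : Option String :=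
  (PySem.Dict.mk m).get? k

-- ===== PORT A =====
-- the 'for i, msg in enumerate(messages): if … : last_assistant_idx = i' loop
def pvLastIdxLoopA : List (List (String × String)) → Int → Int → Int
  | [], _, cur => cur
  | m :: t, i, cur =>
      pvLastIdxLoopA t (i + 1) (if pvGetMsg m "role" == some "assistant" then i else cur)

-- the no-assistant branch: keep system/user with truthy content
def pvFilterSU (ms : List (List (String × String))) : List (List (String × String)) :=
  ms.foldl (fun r m =>
    let role := (pvGetMsg m "role").getD "user"
    let content := (pvGetMsg m "content").getD ""
    if (role == "system" || role == "user") && content != "" then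
      r ++ [[("role", role), ("content", content)]]
    else r) []

-- the sliced branch: skip tool, keep system/user/assistant with truthy content
def pvFilterSUA (ms : List (List (String × String))) : List (List (String × String)) :=
  ms.foldl (fun r m =>
    let role := (pvGetMsg m "role").getD "user"
    let content := (pvGetMsg m "content").getD ""
    if role == "tool" then r
    else if (role == "system" || role == "user" || role == "assistant") && content != "" then
      r ++ [[("role", role), ("content", content)]]
    else r) []

def convert_messages_to_standard_format (messages : List (List (String × String))) : List (List (String × String)) :=
  let last_assistant_idx := pvLastIdxLoopA messages 0 (-1)
  if last_assistant_idx < 0 then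
    pvFilterSU messages
  else
    pvFilterSUA (PySem.List.slice messages none (some last_assistant_idx))

-- ===== PORT B =====
-- one step of B's single pass: snapshot acc on an assistant message, then filter-append
def pvStepB (st : List (List (String × String)) × Option (List (List (String × String))))
    (m : List (String × String)) :
    List (List (String × String)) × Option (List (List (String × String))) :=
  let res := if pvGetMsg m "role" == some "assistant" then some st.1 else st.2
  let role := (pvGetMsg m "role").getD "user"
  let content := (pvGetMsg m "content").getD ""
  let acc := if (role == "system" || role == "user" || role == "assistant") && content != "" then
      st.1 ++ [[("role", role), ("content", content)]]
    else st.1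
  (acc, res)

def convert_messages_to_standard_format_alt (messages : List (List (String × String))) : List (List (String × String)) :=
  let st := messages.foldl pvStepB ([], none)
  match st.2 with
  | none => st.1
  | some r => r

-- ===== PRECONDITION & SPEC =====
def Spec_convert_messages_to_standard_format (messages : List (List (String × String))) (out : List (List (String × String))) : Prop := out = convert_messages_to_standard_format_alt messages
instance (messages : List (List (String × String))) (out : List (List (String × String))) : Decidable (Spec_convert_messages_to_standard_format messages out) := by unfold Spec_convert_messages_to_standard_format; infer_instance

-- ===== CLAIM (what is proved, stated in full; the proofs are below) =====
def Claim_equal_convert_messages_to_standard_format : Prop := ∀ (messages : List (List (String × String))), Dom_convert_messages_to_standard_format messages → Spec_convert_messages_to_standard_format messages (convert_messages_to_standard_format messages)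

-- ===== LEMMAS AND PROOFS =====

-- proof-side vocabulary
def pvIsA (m : List (String × String)) : Bool := pvGetMsg m "role" == some "assistant"

def pvKeep (m : List (String × String)) : Bool :=
  let role := (pvGetMsg m "role").getD "user"
  ((role == "system" || role == "user" || role == "assistant") && (pvGetMsg m "content").getD "" != "")

def pvStd (m : List (String × String)) : List (String × String) :=
  [("role", (pvGetMsg m "role").getD "user"), ("content", (pvGetMsg m "content").getD "")]

def pvF (ms : List (List (String × String))) : List (List (String × String)) :=
  (ms.filter pvKeep).map pvStd

-- position of the last assistant message, recursively from the front
def pvLastA : List (List (String × String)) → Option Nat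
  | [] => none
  | m :: t =>
      match pvLastA t with
      | some k => some (k + 1)
      | none => if pvIsA m then some 0 else none

theorem pvLastIdxLoopA_eq (ms : List (List (String × String))) :
    ∀ (i cur : Int), pvLastIdxLoopA ms i cur =
      (match pvLastA ms with
       | none => cur
       | some k => i + (k : Int)) := by
  induction ms with
  | nil => intro i cur; simp [pvLastIdxLoopA, pvLastA]
  | cons m t ih =>
      intro i cur
      simp only [pvLastIdxLoopA, pvLastA, ih]
      cases h : pvLastA t with
      | some k => push_cast; ring_nf
      | none =>
          by_cases ha : pvGetMsg m "role" = some "assistant"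
          · simp [pvIsA, ha]
          · simp [pvIsA, ha]

theorem pvFilterSUA_eq (ms : List (List (String × String))) :
    ∀ (r : List (List (String × String))),
      ms.foldl (fun r m =>
        let role := (pvGetMsg m "role").getD "user"
        let content := (pvGetMsg m "content").getD ""
        if role == "tool" then r
        else if (role == "system" || role == "user" || role == "assistant") && content != "" then
          r ++ [[("role", role), ("content", content)]]
        else r) r = r ++ pvF ms := by
  induction ms with
  | nil => intro r; simp [pvF]
  | cons m t ih =>
      intro r
      simp only [List.foldl_cons, ih, pvF, List.filter_cons]
      by_cases htool : ((pvGetMsg m "role").getD "user") == "tool"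
      · have hk : pvKeep m = false := by
          simp [pvKeep]
          intro h
          rcases h with h | h <;> simp_all
        simp [htool, hk]
      · by_cases hk : pvKeep m
        · have : ((((pvGetMsg m "role").getD "user") == "system" ||
              ((pvGetMsg m "role").getD "user") == "user" ||
              ((pvGetMsg m "role").getD "user") == "assistant") &&
              (pvGetMsg m "content").getD "" != "") = true := by
            simpa [pvKeep] using hk
          simp [htool, this, hk, pvStd]
        · have : ((((pvGetMsg m "role").getD "user") == "system" ||
              ((pvGetMsg m "role").getD "user") == "user" ||
              ((pvGetMsg m "role").getD "user") == "assistant") &&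
              (pvGetMsg m "content").getD "" != "") = false := by
            simpa [pvKeep] using hk
          simp [htool, this, hk]

-- pvLastA is none exactly when no message has role assistant
theorem pvLastA_none_iff (ms : List (List (String × String))) :
    pvLastA ms = none ↔ ∀ m ∈ ms, pvIsA m = false := by
  induction ms with
  | nil => simp [pvLastA]
  | cons m t ih =>
      simp only [pvLastA, List.forall_mem_cons, ← ih]
      cases h : pvLastA t with
      | some k => simp
      | none => by_cases ha : pvIsA m <;> simp [ha]

-- on a list without assistant messages, A's system/user filter agrees with pvF
theorem pvFilterSU_eq (ms : List (List (String × String))) (hna : ∀ m ∈ ms, pvIsA m = false) :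
    pvFilterSU ms = pvF ms := by
  have key : ∀ (t : List (List (String × String))), (∀ m ∈ t, pvIsA m = false) →
      ∀ (r : List (List (String × String))),
      t.foldl (fun r m =>
        let role := (pvGetMsg m "role").getD "user"
        let content := (pvGetMsg m "content").getD ""
        if (role == "system" || role == "user") && content != "" then
          r ++ [[("role", role), ("content", content)]]
        else r) r = r ++ pvF t := by
    intro t
    induction t with
    | nil => intro _ r; simp [pvF]
    | cons m t ih =>
        intro h r
        have hm : pvIsA m = false := h m (by simp)
        have ht : ∀ m ∈ t, pvIsA m = false := fun m hmem => h m (by simp [hmem])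
        have hrole : (((pvGetMsg m "role").getD "user") == "assistant") = false := by
          simp [pvIsA] at hm
          cases hg : pvGetMsg m "role" with
          | none => simp
          | some v => simp [hg] at hm; simp [hm]
        have hkeep : pvKeep m = ((((pvGetMsg m "role").getD "user") == "system" ||
            ((pvGetMsg m "role").getD "user") == "user") &&
            (pvGetMsg m "content").getD "" != "") := by
          simp [pvKeep, hrole]
        simp only [List.foldl_cons, ih ht, pvF, List.filter_cons]
        by_cases hk : pvKeep m
        · have : ((((pvGetMsg m "role").getD "user") == "system" ||
              ((pvGetMsg m "role").getD "user") == "user") &&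
              (pvGetMsg m "content").getD "" != "") = true := by rw [← hkeep]; exact hk
          simp [this, hk, pvStd]
        · have : ((((pvGetMsg m "role").getD "user") == "system" ||
              ((pvGetMsg m "role").getD "user") == "user") &&
              (pvGetMsg m "content").getD "" != "") = false := by
            rw [← hkeep]; simpa using hk
          simp [this, hk]
  simpa [pvFilterSU] using key ms hna []

-- B's loop invariant: the accumulator is the filtered prefix and the snapshot is
-- the filtered prefix up to the last assistant message seen so far
theorem pvFoldB_eq (ms : List (List (String × String))) :
    ∀ (acc : List (List (String × String)))
      (res : Option (List (List (String × String)))),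
      ms.foldl pvStepB (acc, res) =
        (acc ++ pvF ms,
         match pvLastA ms with
         | none => res
         | some k => some (acc ++ pvF (ms.take k))) := by
  induction ms with
  | nil => intro acc res; simp [pvF, pvLastA]
  | cons m t ih =>
      intro acc res
      have hstep : pvStepB (acc, res) m =
          ((if pvKeep m then acc ++ [pvStd m] else acc),
           (if pvIsA m then some acc else res)) := by
        simp only [pvStepB, pvKeep, pvStd, pvIsA]
        rfl
      have hF : pvF (m :: t) = (if pvKeep m then [pvStd m] else []) ++ pvF t := by
        by_cases hk : pvKeep m <;> simp [pvF, hk]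
      rw [List.foldl_cons, hstep, ih]
      cases h : pvLastA t with
      | none =>
          by_cases ha : pvIsA m <;> by_cases hk : pvKeep m <;>
            simp [pvLastA, h, ha, hk, pvF]
      | some k =>
          by_cases hk : pvKeep m <;>
            simp [pvLastA, h, hk, pvF, List.append_assoc]

theorem convert_messages_to_standard_format_spec : Claim_equal_convert_messages_to_standard_format := by
  intro messages _
  unfold Spec_convert_messages_to_standard_format
  unfold convert_messages_to_standard_format convert_messages_to_standard_format_alt
  rw [pvLastIdxLoopA_eq, pvFoldB_eq]
  cases h : pvLastA messages with
  | none =>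
      have hna : ∀ m ∈ messages, pvIsA m = false := (pvLastA_none_iff messages).mp h
      simp [pvFilterSU_eq messages hna, pvF]
  | some k =>
      simp only [zero_add]
      rw [PySem.List.slice_to_natCast]
      simpa [pvFilterSUA] using pvFilterSUA_eq (messages.take k) []
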